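-- pv_equiv track=rewrite | github.com/nier2kirito/Spin_and_Go_Solver | utils/enhance_hands_repr.py | suit_pattern
-- ===== SOURCE A (Python) =====
-- def parse_hand_ranks(hand):
--     # Split the hand into individual cards
--     cards = hand.split(' ')
--
--     # Extract ranks from the cards
--     ranks = [card[:-1] for card in cards]  # Assuming last character is the suit
--
--     # Count occurrences of each rank
--     rank_counts = {}
--     for rank in ranks:
--         if rank in rank_counts:
--             rank_counts[rank] += 1
--         else:
--             rank_counts[rank] = 1
--
--     # Sort the rank counts and return as a tuple
--     sorted_rank_counts = sorted(tuple(rank_counts.values()),reverse=True)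
--     return sorted_rank_counts
--
-- def suit_pattern(hand):
--     rank_pattern = parse_hand_ranks(hand)
--     suit_arrangement = [card[-1] for card in hand.split(' ')]
--     # Create a "signature" for each arrangement based on where each suit appears
--     signature = {}
--
--     pos = 0
--     for group_idx, group_size in enumerate(rank_pattern):
--         for i in range(group_size):
--             suit = suit_arrangement[pos + i]
--
--             if suit not in signature:
--                 signature[suit] = []
--
--             signature[suit].append(group_idx)
--
--         pos += group_size
--
--     # Sort the signatures by their patterns
--     pattern = sorted(signature.values())
--     return pattern
-- ===== SOURCE B (Python) =====
-- def suit_pattern(hand):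
--     cards = hand.split(' ')
--     ranks = [card[:-1] for card in cards]
--     suits = [card[-1] for card in cards]
--     counts = sorted((ranks.count(r) for r in dict.fromkeys(ranks)), reverse=True)
--     prefix = []
--     total = 0
--     for n in counts:
--         total += n
--         prefix.append(total)
--     signature = {}
--     for j, s in enumerate(suits):
--         g = len([b for b in prefix if b <= j])
--         signature.setdefault(s, []).append(g)
--     return sorted(signature.values())
-- ===== Notes on version B (the rewrite author's own statement) =====
-- stated objective: alternative
-- what changed: B never expands the rank pattern into positional chunks: it builds the prefix sums of the sorted counts once and, in a single pass over enumerate(suits), computes each card's group index arithmetically as the number of prefix sums <= its position, grouping into a dict keyed by suit; A's nested loop with a running position offset disappears. Pre_ excludes hands whose space-split contains an empty token, on which both A and B raise IndexError.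
import Mathlib
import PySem

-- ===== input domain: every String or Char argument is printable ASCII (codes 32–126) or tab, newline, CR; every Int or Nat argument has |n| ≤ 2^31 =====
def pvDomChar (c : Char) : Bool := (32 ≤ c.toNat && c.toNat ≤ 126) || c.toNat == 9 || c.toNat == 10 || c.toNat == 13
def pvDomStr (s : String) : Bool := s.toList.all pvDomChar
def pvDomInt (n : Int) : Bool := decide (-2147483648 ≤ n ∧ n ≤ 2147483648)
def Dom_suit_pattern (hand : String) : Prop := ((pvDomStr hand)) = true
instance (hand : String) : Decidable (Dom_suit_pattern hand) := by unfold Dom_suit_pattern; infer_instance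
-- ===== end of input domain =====

-- B never expands the rank pattern into positional chunks: it builds the prefix sums of the
-- sorted counts once and computes each card's group index arithmetically, as the number of
-- prefix sums ≤ its position, in one pass over the enumerated suits (objective: alternative).

-- ===== PORT A =====
def parse_hand_ranks (hand : String) : List Int :=
  let cards := PySem.Chars.splitOn hand.toList [' ']
  let ranks := cards.map (fun card => PySem.List.slice card none (some (-1)))
  let rank_counts := ranks.foldl
    (fun (d : PySem.Dict (List Char) Int) rank =>
      if d.contains rank then d.insert rank (d.getD rank 0 + 1) else d.insert rank 1)
    PySem.Dict.empty
  PySem.List.sorted rank_counts.values (fun x => x) true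

def suit_pattern (hand : String) : List (List Int) :=
  let rank_pattern := parse_hand_ranks hand
  -- card[-1]: in range under Pre_ (every card nonempty), so the total pyGetD form is exact
  let suit_arrangement := (PySem.Chars.splitOn hand.toList [' ']).map
    (fun card => PySem.List.pyGetD card (-1) ' ')
  let fin := (PySem.List.enumerate rank_pattern 0).foldl
    (fun (st : PySem.Dict Char (List Int) × Int) p =>
      ((PySem.List.pyRange 0 p.2 1).foldl
        (fun sg i => sg.modify (PySem.List.pyGetD suit_arrangement (st.2 + i) ' ') [] (· ++ [p.1]))
        st.1,
       st.2 + p.2))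
    (PySem.Dict.empty, 0)
  PySem.List.sorted fin.1.values (fun x => x) false

-- ===== PORT B =====
def suit_pattern_alt (hand : String) : List (List Int) :=
  let cards := PySem.Chars.splitOn hand.toList [' ']
  let ranks := cards.map (fun card => PySem.List.slice card none (some (-1)))
  let suits := cards.map (fun card => PySem.List.pyGetD card (-1) ' ')
  let counts := PySem.List.sorted
    ((PySem.List.dedup ranks).map (fun r => (PySem.List.count ranks r : Int))) (fun x => x) true
  let prefixSums := (counts.foldl
    (fun (st : List Int × Int) n => (st.1 ++ [st.2 + n], st.2 + n)) ([], 0)).1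
  let signature := (PySem.List.enumerate suits 0).foldl
    (fun (d : PySem.Dict Char (List Int)) p =>
      d.modify p.2 [] (· ++ [((prefixSums.filter (fun b => b ≤ p.1)).length : Int)]))
    PySem.Dict.empty
  PySem.List.sorted signature.values (fun x => x) false

-- ===== PRECONDITION & SPEC =====
-- Pre_ excludes hands whose space-split contains an empty token, on which A's card[-1]
-- raises IndexError (B raises there too).
def Pre_suit_pattern (hand : String) : Prop :=
  ∀ card ∈ PySem.Chars.splitOn hand.toList [' '], card ≠ []
instance (hand : String) : Decidable (Pre_suit_pattern hand) := by
  unfold Pre_suit_pattern; infer_instance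
def pvWitness_suit_pattern : String := "As Kh Ad 2s 2h"

def Spec_suit_pattern (hand : String) (out : List (List Int)) : Prop := out = suit_pattern_alt hand
instance (hand : String) (out : List (List Int)) : Decidable (Spec_suit_pattern hand out) := by unfold Spec_suit_pattern; infer_instance

-- ===== CLAIM (what is proved, stated in full; the proofs are below) =====
def Claim_equal_suit_pattern : Prop := ∀ (hand : String), Dom_suit_pattern hand → Pre_suit_pattern hand → Spec_suit_pattern hand (suit_pattern hand)

-- ===== LEMMAS AND PROOFS =====

-- A's manual counting dict is exactly Counter
lemma countDict_eq_counter (ranks : List (List Char)) :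
    ranks.foldl
      (fun (d : PySem.Dict (List Char) Int) rank =>
        if d.contains rank then d.insert rank (d.getD rank 0 + 1) else d.insert rank 1)
      PySem.Dict.empty
    = PySem.Dict.counter ranks := by
  rw [← PySem.Dict.foldl_insert_getD_add_one_eq_counter]
  congr 1
  funext d rank
  by_cases h : d.contains rank
  · simp [h]
  · rw [PySem.Dict.getD_of_not_contains d 0 (by simpa using h)]
    simp [h]

-- A's rank pattern equals B's
lemma rank_pattern_eq (ranks : List (List Char)) :
    PySem.List.sorted
      (ranks.foldl
        (fun (d : PySem.Dict (List Char) Int) rank =>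
          if d.contains rank then d.insert rank (d.getD rank 0 + 1) else d.insert rank 1)
        PySem.Dict.empty).values (fun x => x) true
    = PySem.List.sorted
        ((PySem.List.dedup ranks).map (fun r => (PySem.List.count ranks r : Int))) (fun x => x) true := by
  rw [countDict_eq_counter]
  congr 1
  show (PySem.Dict.counter ranks).items.map (fun p => p.2) = _
  rw [PySem.Dict.items_counter, List.map_map, PySem.List.dedup_eq_ofList]
  simp [Function.comp, PySem.List.count_eq]

lemma sum_count_ofList (l : List (List Char)) :
    ((PySem.Set.ofList l).map (fun k => List.count k l)).sum = l.length := by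
  have hp : (PySem.Set.ofList l).Perm l.dedup := by
    apply List.perm_of_nodup_nodup_toFinset_eq (PySem.Set.nodup_ofList l) l.nodup_dedup
    ext x; simp [PySem.Set.mem_ofList]
  rw [(hp.map (fun k => List.count k l)).sum_eq]
  have hbe : (instBEqOfDecidableEq : BEq (List Char)) = List.instBEq :=
    lawful_beq_subsingleton _ _
  have := List.sum_map_count_dedup_eq_length l
  rw [hbe] at this
  simpa using this

-- A's inner loop over range(group_size), indexing at pos+i, is a fold over the chunk of suits
lemma chunkFold (suits : List Char) (g : Int) (n pos : Nat) (h : pos + n ≤ suits.length)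
    (sig : PySem.Dict Char (List Int)) :
    (PySem.List.pyRange 0 (n : Int) 1).foldl
      (fun sg i => sg.modify (PySem.List.pyGetD suits ((pos : Int) + i) ' ') [] (· ++ [g])) sig
    = ((suits.drop pos).take n).foldl (fun sg s => sg.modify s [] (· ++ [g])) sig := by
  induction n generalizing sig with
  | zero => simp [PySem.List.pyRange_one_eq_nil]
  | succ m ih =>
    have hcast : ((m + 1 : Nat) : Int) = (m : Int) + 1 := by push_cast; ring
    rw [hcast, PySem.List.pyRange_one_succ_right (by positivity), List.foldl_append]
    have hmem : pos + m < suits.length := by omega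
    have hget : PySem.List.pyGetD suits ((pos : Int) + (m : Int)) ' ' = suits[pos + m] := by
      have : ((pos : Int) + (m : Int)) = ((pos + m : Nat) : Int) := by push_cast; ring
      rw [this, PySem.List.pyGetD_natCast, List.getD_eq_getElem _ _ hmem]
    rw [List.take_add_one]
    have hdrop : (suits.drop pos)[m]? = some suits[pos + m] := by
      rw [List.getElem?_drop, List.getElem?_eq_getElem hmem]
    rw [hdrop, List.foldl_append, ih (by omega)]
    simp [hget]

lemma zip_replicate_const {α β : Type} (l : List α) (n : Nat) (g : β) (h : l.length = n) :
    l.zip (List.replicate n g) = l.map (fun s => (s, g)) := by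
  subst h
  induction l with
  | nil => rfl
  | cons x t ih => simp [List.replicate_succ, ih]

-- A's outer loop with running offset equals one fold over suits zipped with the flat group-id list
lemma outerFold (suits : List Char) :
    ∀ (gl : List (Int × Int)) (sig : PySem.Dict Char (List Int)) (pos : Nat),
      (∀ p ∈ gl, 0 ≤ p.2) → pos + (gl.map (fun p => p.2.toNat)).sum ≤ suits.length →
      (gl.foldl
        (fun (st : PySem.Dict Char (List Int) × Int) p =>
          ((PySem.List.pyRange 0 p.2 1).foldl
            (fun sg i => sg.modify (PySem.List.pyGetD suits (st.2 + i) ' ') [] (· ++ [p.1])) st.1,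
           st.2 + p.2))
        (sig, (pos : Int))).1
      = ((suits.drop pos).zip
          (gl.flatMap (fun p => (PySem.List.pyRange 0 p.2 1).map (fun _ => p.1)))).foldl
          (fun sg q => sg.modify q.1 [] (· ++ [q.2])) sig := by
  intro gl
  induction gl with
  | nil => intro sig pos _ _; simp
  | cons p t ih =>
    intro sig pos hnn hle
    have hp2 : p.2 = ((p.2.toNat : Nat) : Int) := (Int.toNat_of_nonneg (hnn p (by simp))).symm
    set n := p.2.toNat with hn
    have hchunk : pos + n ≤ suits.length := by
      have := hle; simp [List.sum_cons] at this ⊢; omega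
    have hrep : (PySem.List.pyRange 0 p.2 1).map (fun _ => p.1) = List.replicate n p.1 := by
      rw [List.map_const', PySem.List.length_pyRange_one]
      congr 1
      omega
    simp only [List.foldl_cons, List.flatMap_cons]
    have hstate : ((pos : Int) + p.2) = ((pos + n : Nat) : Int) := by
      rw [hp2]; push_cast; ring
    rw [hstate]
    rw [ih _ (pos + n) (fun q hq => hnn q (by simp [hq])) (by simp [List.sum_cons] at hle; omega)]
    have hsplit : suits.drop pos = (suits.drop pos).take n ++ suits.drop (pos + n) := by
      conv_lhs => rw [← List.take_append_drop n (suits.drop pos)]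
      rw [List.drop_drop]
    have hlen : ((suits.drop pos).take n).length = n := by
      rw [List.length_take, List.length_drop]; omega
    conv_rhs => rw [hsplit, hrep]
    rw [List.zip_append (by rw [hlen, List.length_replicate]), List.foldl_append]
    congr 1
    rw [zip_replicate_const _ _ _ hlen, List.foldl_map]
    rw [hp2] at *
    rw [chunkFold suits p.1 n pos hchunk sig]

-- B's prefix-building foldl produces the cumulative sums
def pvCumsum : Int → List Int → List Int
  | _, [] => []
  | t, n :: l => (t + n) :: pvCumsum (t + n) l

lemma foldl_cumsum (l : List Int) : ∀ (acc : List Int) (t : Int),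
    (l.foldl (fun (st : List Int × Int) n => (st.1 ++ [st.2 + n], st.2 + n)) (acc, t)).1
    = acc ++ pvCumsum t l := by
  induction l with
  | nil => intro acc t; simp [pvCumsum]
  | cons n m ih =>
    intro acc t
    simp only [List.foldl_cons, pvCumsum]
    rw [ih (acc ++ [t + n]) (t + n), List.append_assoc]
    rfl

lemma cumsum_ge (l : List Int) (h : ∀ x ∈ l, 0 ≤ x) :
    ∀ t, ∀ b ∈ pvCumsum t l, t ≤ b := by
  induction l with
  | nil => intro t b hb; simp [pvCumsum] at hb
  | cons n m ih =>
    intro t b hb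
    have hn : 0 ≤ n := h n (by simp)
    rcases (by simpa [pvCumsum] using hb : b = t + n ∨ b ∈ pvCumsum (t + n) m) with h1 | h2
    · omega
    · have := ih (fun x hx => h x (by simp [hx])) (t + n) b h2
      omega

-- the j-th flat group id equals the number of cumulative sums ≤ j (B's arithmetic rule)
lemma gid_get (rp : List Int) (h : ∀ x ∈ rp, 0 ≤ x) :
    ∀ (k t : Int) (j : Nat), j < (rp.map Int.toNat).sum →
      ((PySem.List.enumerate rp k).flatMap
        (fun p => (PySem.List.pyRange 0 p.2 1).map (fun _ => p.1)))[j]?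
      = some (k + (((pvCumsum t rp).filter (fun b => b ≤ t + (j : Int))).length : Int)) := by
  induction rp with
  | nil => intro k t j hj; simp at hj
  | cons n l ih =>
    intro k t j hj
    have hn : 0 ≤ n := h n (by simp)
    have hl : ∀ x ∈ l, 0 ≤ x := fun x hx => h x (by simp [hx])
    have hrep : (PySem.List.pyRange 0 n 1).map (fun _ => k) = List.replicate n.toNat k := by
      rw [List.map_const', PySem.List.length_pyRange_one]
      congr 1
      omega
    rw [PySem.List.enumerate_cons, List.flatMap_cons, hrep]
    by_cases hc : j < n.toNat
    · rw [List.getElem?_append_left (by simpa using hc), List.getElem?_replicate]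
      simp only [hc, if_pos]
      have hhead : ¬ (t + n ≤ t + (j : Int)) := by omega
      have htail : ∀ b ∈ pvCumsum (t + n) l, ¬ (b ≤ t + (j : Int)) := by
        intro b hb
        have := cumsum_ge l hl (t + n) b hb
        omega
      have : (pvCumsum t (n :: l)).filter (fun b => b ≤ t + (j : Int)) = [] := by
        simp only [pvCumsum, List.filter_cons]
        rw [if_neg (by simpa using hhead)]
        rw [List.filter_eq_nil_iff]
        intro b hb
        simpa using htail b hb
      rw [this]
      simp
    · have hjn : n.toNat ≤ j := by omega
      rw [List.getElem?_append_right (by simpa using hjn), List.length_replicate]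
      have hj' : j - n.toNat < (l.map Int.toNat).sum := by
        simp [List.sum_cons] at hj; omega
      rw [ih hl (k + 1) (t + n) (j - n.toNat) hj']
      have hcast : (t + n) + ((j - n.toNat : Nat) : Int) = t + (j : Int) := by
        have : ((j - n.toNat : Nat) : Int) = (j : Int) - n.toNat := by omega
        rw [this]
        omega
      rw [hcast]
      have hhead : (t + n) ≤ t + (j : Int) := by omega
      simp only [pvCumsum, List.filter_cons]
      rw [if_pos (by simpa using hhead)]
      simp only [List.length_cons]
      push_cast
      ring_nf

-- the whole A-body equals the whole B-body, for any list of cards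
lemma body_eq (cards : List (List Char)) :
    PySem.List.sorted
      ((PySem.List.enumerate
          (PySem.List.sorted
            ((cards.map (fun card => PySem.List.slice card none (some (-1)))).foldl
              (fun (d : PySem.Dict (List Char) Int) rank =>
                if d.contains rank then d.insert rank (d.getD rank 0 + 1) else d.insert rank 1)
              PySem.Dict.empty).values (fun x => x) true) 0).foldl
        (fun (st : PySem.Dict Char (List Int) × Int) p =>
          ((PySem.List.pyRange 0 p.2 1).foldl
            (fun sg i => sg.modify
              (PySem.List.pyGetD (cards.map (fun card => PySem.List.pyGetD card (-1) ' ')) (st.2 + i) ' ')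
              [] (· ++ [p.1]))
            st.1,
           st.2 + p.2))
        (PySem.Dict.empty, 0)).1.values (fun x => x) false
    = PySem.List.sorted
        ((PySem.List.enumerate (cards.map (fun card => PySem.List.pyGetD card (-1) ' ')) 0).foldl
          (fun (d : PySem.Dict Char (List Int)) p =>
            d.modify p.2 []
              (· ++ [((((PySem.List.sorted
                    ((PySem.List.dedup (cards.map (fun card => PySem.List.slice card none (some (-1))))).map
                      (fun r => (PySem.List.count (cards.map (fun card => PySem.List.slice card none (some (-1)))) r : Int)))
                    (fun x => x) true).foldl
                  (fun (st : List Int × Int) n => (st.1 ++ [st.2 + n], st.2 + n)) ([], 0)).1.filter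
                  (fun b => b ≤ p.1)).length : Int)]))
          PySem.Dict.empty).values (fun x => x) false := by
  set ranks := cards.map (fun card => PySem.List.slice card none (some (-1))) with hranks
  set suits := cards.map (fun card => PySem.List.pyGetD card (-1) ' ') with hsuits
  rw [rank_pattern_eq ranks]
  set rp := PySem.List.sorted
    ((PySem.List.dedup ranks).map (fun r => (PySem.List.count ranks r : Int))) (fun x => x) true with hrp
  set gl := PySem.List.enumerate rp 0 with hgl
  set gids := gl.flatMap (fun p => (PySem.List.pyRange 0 p.2 1).map (fun _ => p.1)) with hgids
  have hnn : ∀ x ∈ rp, 0 ≤ x := by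
    intro x hx
    rw [hrp, PySem.List.mem_sorted] at hx
    obtain ⟨r, _, hr⟩ := List.mem_map.mp hx
    omega
  have hsum : (rp.map Int.toNat).sum = suits.length := by
    have hperm := (PySem.List.sorted_perm
      ((PySem.List.dedup ranks).map (fun r => (PySem.List.count ranks r : Int))) (fun x => x) true)
    rw [hrp, (hperm.map Int.toNat).sum_eq, List.map_map, PySem.List.dedup_eq_ofList]
    have : ((fun n : Int => n.toNat) ∘ fun r => (PySem.List.count ranks r : Int))
        = fun r => List.count r ranks := by
      funext r; simp [PySem.List.count_eq]
    rw [this, sum_count_ofList, hranks, hsuits, List.length_map, List.length_map]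
  have hnn' : ∀ p ∈ gl, 0 ≤ p.2 := by
    intro p hp
    rw [hgl, PySem.List.mem_enumerate_iff] at hp
    obtain ⟨k, hk, rfl⟩ := hp
    exact hnn _ (List.getElem_mem hk)
  have hsum' : (gl.map (fun p => p.2.toNat)).sum = suits.length := by
    have : gl.map (fun p => p.2.toNat) = (gl.map (fun p => p.2)).map Int.toNat := by
      rw [List.map_map]; rfl
    rw [this, hgl, PySem.List.map_snd_enumerate, hsum]
  have houter := outerFold suits gl PySem.Dict.empty 0 hnn' (by rw [hsum']; omega)
  clear_value gids gl rp suits ranks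
  rw [List.drop_zero] at houter
  rw [Nat.cast_zero] at houter
  rw [← hgids] at houter
  rw [houter]
  -- B's prefix list is the cumulative sums of rp
  rw [foldl_cumsum rp [] 0, List.nil_append]
  -- the zipped list A folds over IS the enumerated list B folds over, mapped through B's rule
  have hglen : suits.length ≤ gids.length := by
    rw [hgids, List.length_flatMap]
    have : gl.map (fun p => ((PySem.List.pyRange 0 p.2 1).map (fun _ => p.1)).length)
        = gl.map (fun p => p.2.toNat) := by
      apply List.map_congr_left
      intro p hp
      rw [List.length_map, PySem.List.length_pyRange_one]
      have := hnn' p hp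
      omega
    rw [this, hsum']
  have hzip : suits.zip gids
      = (PySem.List.enumerate suits 0).map
          (fun p => (p.2, (((pvCumsum 0 rp).filter (fun b => b ≤ p.1)).length : Int))) := by
    apply List.ext_getElem
    · rw [List.length_zip, List.length_map, PySem.List.length_enumerate]
      omega
    · intro j h1 h2
      rw [List.length_zip] at h1
      have hjs : j < suits.length := by omega
      have hjg : j < gids.length := by omega
      rw [List.getElem_zip, List.getElem_map, PySem.List.getElem_enumerate]
      have hthis := gid_get rp hnn 0 0 j (by rw [hsum]; exact hjs)
      rw [← hgl, ← hgids] at hthis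
      rw [List.getElem?_eq_getElem hjg] at hthis
      have hval := Option.some_injective _ hthis
      simp only [zero_add] at hval ⊢
      rw [hval]
  rw [hzip, List.foldl_map]

-- ===== VERDICT (by name: the statement is the Claim_ definition above) =====
theorem suit_pattern_spec : Claim_equal_suit_pattern := by
  intro hand _ _
  show suit_pattern hand = suit_pattern_alt hand
  exact body_eq (PySem.Chars.splitOn hand.toList [' '])
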